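-- pv_equiv track=rewrite | github.com/astro-informatics/sleplet | src/sleplet/utils/plot_methods.py | calc_plot_resolution
-- ===== SOURCE A (Python) =====
-- def calc_plot_resolution(L: int) -> int:
--     """
--     calculate appropriate resolution for given L
--     """
--     res_dict = {1: 6, 2: 5, 3: 4, 7: 3, 9: 2, 10: 1}
--
--     return next(
--         (
--             L * 2**exponent
--             for log_bandlimit, exponent in res_dict.items()
--             if 2**log_bandlimit > L
--         ),
--         L,
--     )
-- ===== SOURCE B (Python) =====
-- def calc_plot_resolution(L: int) -> int:
--     # sorted thresholds 2**k and parallel multipliers 2**exp from A's table;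
--     # binary search for the first threshold strictly greater than L
--     thresholds = (2, 4, 8, 128, 512, 1024)
--     mults = (64, 32, 16, 8, 4, 2)
--     lo, hi = 0, 6
--     while lo < hi:
--         mid = (lo + hi) // 2
--         if thresholds[mid] <= L:
--             lo = mid + 1
--         else:
--             hi = mid
--     return L * mults[lo] if lo < 6 else L
-- ===== Notes on version B (the rewrite author's own statement) =====
-- stated objective: alternative
-- what changed: Replaces A's linear scan over a dict of log-thresholds (computing 2**k inside the generator) with a hand-written binary search (bisect_right) over a sorted tuple of precomputed thresholds with a parallel multiplier table.
import Mathlib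
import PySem

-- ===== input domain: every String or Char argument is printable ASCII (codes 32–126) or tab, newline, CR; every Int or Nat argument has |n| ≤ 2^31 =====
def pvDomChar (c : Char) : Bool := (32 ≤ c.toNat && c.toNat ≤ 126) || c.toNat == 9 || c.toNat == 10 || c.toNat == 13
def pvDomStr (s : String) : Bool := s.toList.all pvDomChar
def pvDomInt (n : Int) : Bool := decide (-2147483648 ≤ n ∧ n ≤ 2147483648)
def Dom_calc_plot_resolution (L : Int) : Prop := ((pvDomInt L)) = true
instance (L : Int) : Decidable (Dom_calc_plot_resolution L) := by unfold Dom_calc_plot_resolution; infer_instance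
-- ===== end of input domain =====

-- B replaces A's linear scan over a dict of log-thresholds with a binary search over a
-- sorted precomputed threshold table (alternative decomposition; same cost on a 6-entry table).

-- ===== PORT A =====
-- the generator-with-default `next((L * 2**e for k, e in res_dict.items() if 2**k > L), L)`,
-- scanned item by item in dict order
def pvScan (L : Int) : List (Int × Int) → Int
  | [] => L
  | (k, e) :: rest => if (2 : Int) ^ k.toNat > L then L * (2 : Int) ^ e.toNat else pvScan L rest

def calc_plot_resolution (L : Int) : Int :=
  let res_dict : List (Int × Int) := [(1, 6), (2, 5), (3, 4), (7, 3), (9, 2), (10, 1)]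
  pvScan L res_dict

-- ===== PORT B =====
def pvThs : List Int := [2, 4, 8, 128, 512, 1024]
def pvMults : List Int := [64, 32, 16, 8, 4, 2]

-- hand-ported binary search (bisect_right): first index whose threshold is > L;
-- the fuel argument (6 = hi - lo at the initial call) only bounds the while loop to make it total
def pvBs (L : Int) : Nat → Nat → Nat → Nat
  | 0, lo, _ => lo
  | fuel + 1, lo, hi =>
    if lo < hi then
      let mid := (lo + hi) / 2
      if pvThs.getD mid 0 ≤ L then pvBs L fuel (mid + 1) hi else pvBs L fuel lo mid
    else lo

def calc_plot_resolution_alt (L : Int) : Int :=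
  let i := pvBs L 6 0 6
  if i < 6 then L * pvMults.getD i 0 else L

-- ===== PRECONDITION & SPEC =====
def Spec_calc_plot_resolution (L : Int) (out : Int) : Prop := out = calc_plot_resolution_alt L
instance (L : Int) (out : Int) : Decidable (Spec_calc_plot_resolution L out) := by unfold Spec_calc_plot_resolution; infer_instance

-- ===== CLAIM (what is proved, stated in full; the proofs are below) =====
def Claim_equal_calc_plot_resolution : Prop := ∀ (L : Int), Dom_calc_plot_resolution L → Spec_calc_plot_resolution L (calc_plot_resolution L)

-- ===== LEMMAS AND PROOFS =====

theorem bs_eval (L : Int) :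
    pvBs L 6 0 6 = if L < 2 then 0 else if L < 4 then 1 else if L < 8 then 2
      else if L < 128 then 3 else if L < 512 then 4 else if L < 1024 then 5 else 6 := by
  split_ifs with h1 h2 h3 h4 h5 h6
  · rw [show pvBs L 6 0 6 = (if (128 : Int) ≤ L then pvBs L 5 4 6 else pvBs L 5 0 3) from rfl]
    rw [if_neg (show ¬ ((128 : Int) ≤ L) by omega)]
    rw [show pvBs L 5 0 3 = (if (4 : Int) ≤ L then pvBs L 4 2 3 else pvBs L 4 0 1) from rfl]
    rw [if_neg (show ¬ ((4 : Int) ≤ L) by omega)]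
    rw [show pvBs L 4 0 1 = (if (2 : Int) ≤ L then pvBs L 3 1 1 else pvBs L 3 0 0) from rfl]
    rw [if_neg (show ¬ ((2 : Int) ≤ L) by omega)]
    rw [show pvBs L 3 0 0 = 0 from rfl]
  · rw [show pvBs L 6 0 6 = (if (128 : Int) ≤ L then pvBs L 5 4 6 else pvBs L 5 0 3) from rfl]
    rw [if_neg (show ¬ ((128 : Int) ≤ L) by omega)]
    rw [show pvBs L 5 0 3 = (if (4 : Int) ≤ L then pvBs L 4 2 3 else pvBs L 4 0 1) from rfl]
    rw [if_neg (show ¬ ((4 : Int) ≤ L) by omega)]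
    rw [show pvBs L 4 0 1 = (if (2 : Int) ≤ L then pvBs L 3 1 1 else pvBs L 3 0 0) from rfl]
    rw [if_pos (show (2 : Int) ≤ L by omega)]
    rw [show pvBs L 3 1 1 = 1 from rfl]
  · rw [show pvBs L 6 0 6 = (if (128 : Int) ≤ L then pvBs L 5 4 6 else pvBs L 5 0 3) from rfl]
    rw [if_neg (show ¬ ((128 : Int) ≤ L) by omega)]
    rw [show pvBs L 5 0 3 = (if (4 : Int) ≤ L then pvBs L 4 2 3 else pvBs L 4 0 1) from rfl]
    rw [if_pos (show (4 : Int) ≤ L by omega)]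
    rw [show pvBs L 4 2 3 = (if (8 : Int) ≤ L then pvBs L 3 3 3 else pvBs L 3 2 2) from rfl]
    rw [if_neg (show ¬ ((8 : Int) ≤ L) by omega)]
    rw [show pvBs L 3 2 2 = 2 from rfl]
  · rw [show pvBs L 6 0 6 = (if (128 : Int) ≤ L then pvBs L 5 4 6 else pvBs L 5 0 3) from rfl]
    rw [if_neg (show ¬ ((128 : Int) ≤ L) by omega)]
    rw [show pvBs L 5 0 3 = (if (4 : Int) ≤ L then pvBs L 4 2 3 else pvBs L 4 0 1) from rfl]
    rw [if_pos (show (4 : Int) ≤ L by omega)]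
    rw [show pvBs L 4 2 3 = (if (8 : Int) ≤ L then pvBs L 3 3 3 else pvBs L 3 2 2) from rfl]
    rw [if_pos (show (8 : Int) ≤ L by omega)]
    rw [show pvBs L 3 3 3 = 3 from rfl]
  · rw [show pvBs L 6 0 6 = (if (128 : Int) ≤ L then pvBs L 5 4 6 else pvBs L 5 0 3) from rfl]
    rw [if_pos (show (128 : Int) ≤ L by omega)]
    rw [show pvBs L 5 4 6 = (if (1024 : Int) ≤ L then pvBs L 4 6 6 else pvBs L 4 4 5) from rfl]
    rw [if_neg (show ¬ ((1024 : Int) ≤ L) by omega)]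
    rw [show pvBs L 4 4 5 = (if (512 : Int) ≤ L then pvBs L 3 5 5 else pvBs L 3 4 4) from rfl]
    rw [if_neg (show ¬ ((512 : Int) ≤ L) by omega)]
    rw [show pvBs L 3 4 4 = 4 from rfl]
  · rw [show pvBs L 6 0 6 = (if (128 : Int) ≤ L then pvBs L 5 4 6 else pvBs L 5 0 3) from rfl]
    rw [if_pos (show (128 : Int) ≤ L by omega)]
    rw [show pvBs L 5 4 6 = (if (1024 : Int) ≤ L then pvBs L 4 6 6 else pvBs L 4 4 5) from rfl]
    rw [if_neg (show ¬ ((1024 : Int) ≤ L) by omega)]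
    rw [show pvBs L 4 4 5 = (if (512 : Int) ≤ L then pvBs L 3 5 5 else pvBs L 3 4 4) from rfl]
    rw [if_pos (show (512 : Int) ≤ L by omega)]
    rw [show pvBs L 3 5 5 = 5 from rfl]
  · rw [show pvBs L 6 0 6 = (if (128 : Int) ≤ L then pvBs L 5 4 6 else pvBs L 5 0 3) from rfl]
    rw [if_pos (show (128 : Int) ≤ L by omega)]
    rw [show pvBs L 5 4 6 = (if (1024 : Int) ≤ L then pvBs L 4 6 6 else pvBs L 4 4 5) from rfl]
    rw [if_pos (show (1024 : Int) ≤ L by omega)]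
    rw [show pvBs L 4 6 6 = 6 from rfl]

theorem a_eval (L : Int) :
    calc_plot_resolution L = if L < 2 then L * 64 else if L < 4 then L * 32 else if L < 8 then L * 16
      else if L < 128 then L * 8 else if L < 512 then L * 4 else if L < 1024 then L * 2 else L := by
  unfold calc_plot_resolution
  simp only [pvScan,
    show ((2 : Int) ^ Int.toNat 1) = 2 from by decide,
    show ((2 : Int) ^ Int.toNat 2) = 4 from by decide,
    show ((2 : Int) ^ Int.toNat 3) = 8 from by decide,
    show ((2 : Int) ^ Int.toNat 7) = 128 from by decide,
    show ((2 : Int) ^ Int.toNat 9) = 512 from by decide,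
    show ((2 : Int) ^ Int.toNat 10) = 1024 from by decide,
    show ((2 : Int) ^ Int.toNat 6) = 64 from by decide,
    show ((2 : Int) ^ Int.toNat 5) = 32 from by decide,
    show ((2 : Int) ^ Int.toNat 4) = 16 from by decide,
    gt_iff_lt]

theorem b_eval (L : Int) :
    calc_plot_resolution_alt L = if L < 2 then L * 64 else if L < 4 then L * 32 else if L < 8 then L * 16
      else if L < 128 then L * 8 else if L < 512 then L * 4 else if L < 1024 then L * 2 else L := by
  unfold calc_plot_resolution_alt
  rw [bs_eval]
  by_cases h1 : L < 2
  · rw [if_pos h1]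
    rw [if_pos (show (0 : Nat) < 6 from by decide)]
    rw [show pvMults.getD 0 0 = 64 from by decide]
    try rw [if_pos h1]
  by_cases h2 : L < 4
  · rw [if_neg h1]
    rw [if_pos h2]
    rw [if_pos (show (1 : Nat) < 6 from by decide)]
    rw [show pvMults.getD 1 0 = 32 from by decide]
    try rw [if_neg h1]
    try rw [if_pos h2]
  by_cases h3 : L < 8
  · rw [if_neg h1]
    rw [if_neg h2]
    rw [if_pos h3]
    rw [if_pos (show (2 : Nat) < 6 from by decide)]
    rw [show pvMults.getD 2 0 = 16 from by decide]
    try rw [if_neg h1]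
    try rw [if_neg h2]
    try rw [if_pos h3]
  by_cases h4 : L < 128
  · rw [if_neg h1]
    rw [if_neg h2]
    rw [if_neg h3]
    rw [if_pos h4]
    rw [if_pos (show (3 : Nat) < 6 from by decide)]
    rw [show pvMults.getD 3 0 = 8 from by decide]
    try rw [if_neg h1]
    try rw [if_neg h2]
    try rw [if_neg h3]
    try rw [if_pos h4]
  by_cases h5 : L < 512
  · rw [if_neg h1]
    rw [if_neg h2]
    rw [if_neg h3]
    rw [if_neg h4]
    rw [if_pos h5]
    rw [if_pos (show (4 : Nat) < 6 from by decide)]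
    rw [show pvMults.getD 4 0 = 4 from by decide]
    try rw [if_neg h1]
    try rw [if_neg h2]
    try rw [if_neg h3]
    try rw [if_neg h4]
    try rw [if_pos h5]
  by_cases h6 : L < 1024
  · rw [if_neg h1]
    rw [if_neg h2]
    rw [if_neg h3]
    rw [if_neg h4]
    rw [if_neg h5]
    rw [if_pos h6]
    rw [if_pos (show (5 : Nat) < 6 from by decide)]
    rw [show pvMults.getD 5 0 = 2 from by decide]
    try rw [if_neg h1]
    try rw [if_neg h2]
    try rw [if_neg h3]
    try rw [if_neg h4]
    try rw [if_neg h5]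
    try rw [if_pos h6]
  · rw [if_neg h1]
    rw [if_neg h2]
    rw [if_neg h3]
    rw [if_neg h4]
    rw [if_neg h5]
    rw [if_neg h6]
    rw [if_neg (show ¬ ((6 : Nat) < 6) from by decide)]
    try rw [if_neg h1]
    try rw [if_neg h2]
    try rw [if_neg h3]
    try rw [if_neg h4]
    try rw [if_neg h5]
    try rw [if_neg h6]

-- ===== VERDICT (by name: the statement is the Claim_ definition above) =====
theorem calc_plot_resolution_spec : Claim_equal_calc_plot_resolution := by
  intro L _
  unfold Spec_calc_plot_resolution
  rw [a_eval, b_eval]
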